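-- pv_equiv track=rewrite | github.com/ThomasPzt/Enigma_Cesar | projet.py | diviser_avec_roulement
-- ===== SOURCE A (Python) =====
-- def diviser_avec_roulement(chaine):
--     chaine1 = ""
--     chaine2 = ""
--     chaine3 = ""
--
--     for i in range(len(chaine)):
--         if i % 3 == 0:
--             chaine1 += chaine[i]
--         elif i % 3 == 1:
--             chaine2 += chaine[i]
--         else:
--             chaine3 += chaine[i]
--
--     return chaine1, chaine2, chaine3
-- ===== SOURCE B (Python) =====
-- def diviser_avec_roulement(chaine):
--     # Three independent strided slices instead of one index-dispatch loop.
--     return chaine[0::3], chaine[1::3], chaine[2::3]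
-- ===== Notes on version B (the rewrite author's own statement) =====
-- stated objective: idiomatic
-- what changed: Replaced the single loop that branches on i % 3 into three growing string accumulators by three direct strided slices chaine[0::3], chaine[1::3], chaine[2::3].
import Mathlib
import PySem

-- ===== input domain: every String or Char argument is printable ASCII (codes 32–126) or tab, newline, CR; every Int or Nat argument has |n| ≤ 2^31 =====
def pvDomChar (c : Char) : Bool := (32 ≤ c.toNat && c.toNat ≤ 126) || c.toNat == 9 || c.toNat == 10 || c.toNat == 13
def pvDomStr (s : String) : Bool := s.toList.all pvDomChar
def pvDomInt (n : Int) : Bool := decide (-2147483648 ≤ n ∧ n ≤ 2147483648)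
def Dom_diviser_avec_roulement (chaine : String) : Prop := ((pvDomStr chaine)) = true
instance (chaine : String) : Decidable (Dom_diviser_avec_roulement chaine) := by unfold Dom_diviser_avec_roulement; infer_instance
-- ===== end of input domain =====

-- B replaces A's index-dispatch accumulation loop by three independent strided slices (idiomatic).


-- ===== PORT A =====
-- the loop body: dispatch chaine[i] into one of the three accumulators by i % 3
def pvStepA (acc : List Char × List Char × List Char) (p : Int × Char) :
    List Char × List Char × List Char :=
  if p.1 % 3 = 0 then (acc.1 ++ [p.2], acc.2.1, acc.2.2)
  else if p.1 % 3 = 1 then (acc.1, acc.2.1 ++ [p.2], acc.2.2)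
  else (acc.1, acc.2.1, acc.2.2 ++ [p.2])

def diviser_avec_roulement (chaine : String) : String × String × String :=
  let r := (PySem.List.enumerate chaine.toList 0).foldl pvStepA
      (([] : List Char), ([] : List Char), ([] : List Char))
  (String.mk r.1, String.mk r.2.1, String.mk r.2.2)

-- ===== PORT B =====
-- l[::3] : every third element, starting with the head (Python slice with step 3)
def pvEvery3 : List Char → List Char
  | [] => []
  | c :: rest => c :: pvEvery3 (rest.drop 2)
termination_by l => l.length
decreasing_by simp

def diviser_avec_roulement_alt (chaine : String) : String × String × String :=
  let l := chaine.toList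
  (String.mk (pvEvery3 l), String.mk (pvEvery3 (l.drop 1)), String.mk (pvEvery3 (l.drop 2)))

-- ===== PRECONDITION & SPEC =====
def Spec_diviser_avec_roulement (chaine : String) (out : String × String × String) : Prop := out = diviser_avec_roulement_alt chaine
instance (chaine : String) (out : String × String × String) : Decidable (Spec_diviser_avec_roulement chaine out) := by unfold Spec_diviser_avec_roulement; infer_instance

-- ===== CLAIM (what is proved, stated in full; the proofs are below) =====
def Claim_equal_diviser_avec_roulement : Prop := ∀ (chaine : String), Dom_diviser_avec_roulement chaine → Spec_diviser_avec_roulement chaine (diviser_avec_roulement chaine)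

-- ===== LEMMAS AND PROOFS =====

@[simp] theorem pvEvery3_nil : pvEvery3 [] = [] := by rw [pvEvery3]
@[simp] theorem pvEvery3_cons (c : Char) (l : List Char) :
    pvEvery3 (c :: l) = c :: pvEvery3 (l.drop 2) := by rw [pvEvery3]

-- loop invariant: folding A's step over the elements enumerated from index n
-- distributes them into the three accumulators according to n % 3
theorem pvLoopA_eq (l : List Char) : ∀ (n : Nat) (a b c : List Char),
    (PySem.List.enumerate l (n : Int)).foldl pvStepA (a, b, c) =
      if n % 3 = 0 then (a ++ pvEvery3 l, b ++ pvEvery3 (l.drop 1), c ++ pvEvery3 (l.drop 2))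
      else if n % 3 = 1 then (a ++ pvEvery3 (l.drop 2), b ++ pvEvery3 l, c ++ pvEvery3 (l.drop 1))
      else (a ++ pvEvery3 (l.drop 1), b ++ pvEvery3 (l.drop 2), c ++ pvEvery3 l) := by
  induction l with
  | nil => intro n a b c; split_ifs <;> simp [PySem.List.enumerate_nil]
  | cons x l ih =>
    intro n a b c
    have hmod : ((n : Int) + 1) = ((n + 1 : Nat) : Int) := by push_cast; ring
    rw [PySem.List.enumerate_cons, List.foldl_cons, hmod]
    rcases (by omega : n % 3 = 0 ∨ n % 3 = 1 ∨ n % 3 = 2) with h | h | h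
    · have hstep : pvStepA (a, b, c) ((n : Int), x) = (a ++ [x], b, c) := by
        simp only [pvStepA]
        have : (n : Int) % 3 = 0 := by omega
        simp [this]
      rw [hstep, ih (n + 1)]
      have h1 : (n + 1) % 3 = 1 := by omega
      simp [h, h1]
    · have hstep : pvStepA (a, b, c) ((n : Int), x) = (a, b ++ [x], c) := by
        simp only [pvStepA]
        have h0 : ¬ ((n : Int) % 3 = 0) := by omega
        have h1 : (n : Int) % 3 = 1 := by omega
        simp [h0, h1]
      rw [hstep, ih (n + 1)]
      have h2 : (n + 1) % 3 = 2 := by omega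
      simp [h, h2]
    · have hstep : pvStepA (a, b, c) ((n : Int), x) = (a, b, c ++ [x]) := by
        simp only [pvStepA]
        have h0 : ¬ ((n : Int) % 3 = 0) := by omega
        have h1 : ¬ ((n : Int) % 3 = 1) := by omega
        simp [h0, h1]
      rw [hstep, ih (n + 1)]
      have h0 : (n + 1) % 3 = 0 := by omega
      simp [h, h0]

-- ===== VERDICT (by name: the statement is the Claim_ definition above) =====
theorem diviser_avec_roulement_spec : Claim_equal_diviser_avec_roulement := by
  intro chaine _
  unfold Spec_diviser_avec_roulement diviser_avec_roulement diviser_avec_roulement_alt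
  have h := pvLoopA_eq chaine.toList 0 [] [] []
  norm_num at h
  simp [h]
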